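-- pv_equiv track=rewrite | github.com/MeTuseL/poe-build-pricer | backend/parsing/decoder/pob_decoder.py | get_item_type_and_subtype
-- ===== SOURCE A (Python) =====
-- def get_item_type_and_subtype(item_base: str, mapping: dict):
--     """
--     Given an item base, return its generic type and subtype using ITEM_TYPE_MAPPING.
--     Example: "Sinner Tricorne" → ("Armour", "Helmet").
--     """
--     if not item_base or not mapping:
--         return None, None
--     for item_type, subtypes in mapping.items():
--         for sub_type, bases in subtypes.items():
--             if item_base in bases:
--                 return item_type, sub_type
--     return None, None
-- ===== SOURCE B (Python) =====
-- def get_item_type_and_subtype(item_base: str, mapping: dict):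
--     """
--     Given an item base, return its generic type and subtype using ITEM_TYPE_MAPPING.
--     Build a flat reverse-lookup index (first occurrence wins) and look the base up once.
--     """
--     if not item_base or not mapping:
--         return None, None
--     index = {}
--     for item_type, subtypes in mapping.items():
--         for sub_type, bases in subtypes.items():
--             for base in bases:
--                 if base not in index:
--                     index[base] = (item_type, sub_type)
--     return index.get(item_base, (None, None))
-- ===== Notes on version B (the rewrite author's own statement) =====
-- stated objective: alternative
-- what changed: Replaces the nested scan with early exit by a single pass that builds a flat reverse-lookup dict (first occurrence of each base wins) followed by one dict lookup.
import Mathlib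
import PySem

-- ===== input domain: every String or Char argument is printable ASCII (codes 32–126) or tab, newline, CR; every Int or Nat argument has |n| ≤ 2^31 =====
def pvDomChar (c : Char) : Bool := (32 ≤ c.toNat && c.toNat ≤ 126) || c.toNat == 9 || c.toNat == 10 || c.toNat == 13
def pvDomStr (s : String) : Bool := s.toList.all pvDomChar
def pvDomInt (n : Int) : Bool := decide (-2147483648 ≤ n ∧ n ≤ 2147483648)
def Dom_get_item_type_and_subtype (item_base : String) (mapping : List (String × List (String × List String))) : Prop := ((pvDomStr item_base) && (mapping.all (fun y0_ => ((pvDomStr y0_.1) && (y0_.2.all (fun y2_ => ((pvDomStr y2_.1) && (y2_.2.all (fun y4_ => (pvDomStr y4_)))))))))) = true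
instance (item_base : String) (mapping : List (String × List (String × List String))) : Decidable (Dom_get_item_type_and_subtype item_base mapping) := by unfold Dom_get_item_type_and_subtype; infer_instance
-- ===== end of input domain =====

-- B builds a flat reverse-lookup dict once (first occurrence of each base wins) and looks the base up; same cost, different decomposition.


-- ===== PORT A =====
-- inner 'for sub_type, bases in subtypes.items()' with early return (item_type, sub_type)
def pvA_sub (item_base item_type : String) : List (String × List String) → Option (String × String)
  | [] => none
  | (sub_type, bases) :: rest =>
      if bases.contains item_base then some (item_type, sub_type)
      else pvA_sub item_base item_type rest

-- outer 'for item_type, subtypes in mapping.items()' with early return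
def pvA_outer (item_base : String) : List (String × List (String × List String)) → Option (String × String)
  | [] => none
  | (item_type, subtypes) :: rest =>
      match pvA_sub item_base item_type subtypes with
      | some r => some r
      | none => pvA_outer item_base rest

def get_item_type_and_subtype (item_base : String) (mapping : List (String × List (String × List String))) : Option String × Option String :=
  if item_base = "" ∨ mapping = [] then (none, none)
  else
    match pvA_outer item_base mapping with
    | some (t, s) => (some t, some s)
    | none => (none, none)

-- ===== PORT B =====
-- 'for base in bases: if base not in index: index[base] = (item_type, sub_type)'
def pvB_bases (item_type sub_type : String) : List String → PySem.Dict String (String × String) → PySem.Dict String (String × String)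
  | [], d => d
  | base :: rest, d =>
      pvB_bases item_type sub_type rest
        (if d.contains base then d else d.insert base (item_type, sub_type))

def pvB_subs (item_type : String) : List (String × List String) → PySem.Dict String (String × String) → PySem.Dict String (String × String)
  | [], d => d
  | (sub_type, bases) :: rest, d =>
      pvB_subs item_type rest (pvB_bases item_type sub_type bases d)

def pvB_index : List (String × List (String × List String)) → PySem.Dict String (String × String) → PySem.Dict String (String × String)
  | [], d => d
  | (item_type, subtypes) :: rest, d =>
      pvB_index rest (pvB_subs item_type subtypes d)

def get_item_type_and_subtype_alt (item_base : String) (mapping : List (String × List (String × List String))) : Option String × Option String :=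
  if item_base = "" ∨ mapping = [] then (none, none)
  else
    match (pvB_index mapping PySem.Dict.empty).get? item_base with
    | some (t, s) => (some t, some s)
    | none => (none, none)

-- ===== PRECONDITION & SPEC =====
def Spec_get_item_type_and_subtype (item_base : String) (mapping : List (String × List (String × List String))) (out : Option String × Option String) : Prop := out = get_item_type_and_subtype_alt item_base mapping
instance (item_base : String) (mapping : List (String × List (String × List String))) (out : Option String × Option String) : Decidable (Spec_get_item_type_and_subtype item_base mapping out) := by unfold Spec_get_item_type_and_subtype; infer_instance

-- ===== CLAIM (what is proved, stated in full; the proofs are below) =====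
def Claim_equal_get_item_type_and_subtype : Prop := ∀ (item_base : String) (mapping : List (String × List (String × List String))), Dom_get_item_type_and_subtype item_base mapping → Spec_get_item_type_and_subtype item_base mapping (get_item_type_and_subtype item_base mapping)

-- ===== LEMMAS AND PROOFS =====

-- the bases loop: lookup afterwards = previous binding, else first match in bases
theorem pvB_bases_get? (t s x : String) (bases : List String) (d : PySem.Dict String (String × String)) :
    (pvB_bases t s bases d).get? x =
      match d.get? x with
      | some v => some v
      | none => if bases.contains x then some (t, s) else none := by
  induction bases generalizing d with
  | nil => cases h : d.get? x <;> simp [pvB_bases, h]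
  | cons b rest ih =>
      simp only [pvB_bases, ih]
      by_cases hb : x = b
      · subst hb
        cases hc : d.contains x
        · have hnone : d.get? x = none := by
            have := PySem.Dict.contains_eq_isSome_get? (d := d) (k := x)
            cases h : d.get? x
            · rfl
            · rw [h] at this; simp [hc] at this
          simp [hnone, PySem.Dict.get?_insert_self]
        · have hsome : (d.get? x).isSome := by
            rw [← PySem.Dict.contains_eq_isSome_get?]; exact hc
          obtain ⟨v, hv⟩ := Option.isSome_iff_exists.mp hsome
          simp [hv]
      · cases hc : d.contains b
        · simp only [Bool.false_eq_true, if_false, PySem.Dict.get?_insert, if_neg hb]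
          cases h : d.get? x <;> simp [hb]
        · simp only [if_true]
          cases h : d.get? x <;> simp [hb]

-- the subtypes loop
theorem pvB_subs_get? (t x : String) (subs : List (String × List String)) (d : PySem.Dict String (String × String)) :
    (pvB_subs t subs d).get? x =
      match d.get? x with
      | some v => some v
      | none => pvA_sub x t subs := by
  induction subs generalizing d with
  | nil => cases h : d.get? x <;> simp [pvB_subs, pvA_sub, h]
  | cons p rest ih =>
      obtain ⟨s, bases⟩ := p
      simp only [pvB_subs, ih, pvB_bases_get?, pvA_sub]
      cases h : d.get? x
      · by_cases hm : x ∈ bases <;> simp [hm]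
      · simp

-- the outer loop
theorem pvB_index_get? (x : String) (l : List (String × List (String × List String))) (d : PySem.Dict String (String × String)) :
    (pvB_index l d).get? x =
      match d.get? x with
      | some v => some v
      | none => pvA_outer x l := by
  induction l generalizing d with
  | nil => cases h : d.get? x <;> simp [pvB_index, pvA_outer, h]
  | cons p rest ih =>
      obtain ⟨t, subs⟩ := p
      simp only [pvB_index, ih, pvB_subs_get?, pvA_outer]
      cases h : d.get? x
      · cases hs : pvA_sub x t subs <;> simp
      · simp

-- ===== VERDICT (by name: the statement is the Claim_ definition above) =====
theorem get_item_type_and_subtype_spec : Claim_equal_get_item_type_and_subtype := by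
  intro item_base mapping _
  unfold Spec_get_item_type_and_subtype get_item_type_and_subtype get_item_type_and_subtype_alt
  by_cases hg : item_base = "" ∨ mapping = []
  · simp [hg]
  · rw [if_neg hg, if_neg hg, pvB_index_get? item_base mapping PySem.Dict.empty]
    simp [PySem.Dict.get?_empty]
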